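-- pv_equiv track=rewrite | github.com/pranavagrawal321/Workat.tech | Remove occurences/Remove occurences.py | removeOccurences
-- ===== SOURCE A (Python) =====
-- from typing import List
--
-- def removeOccurences(Array: List[int], Number: int) -> int:
-- 	# add your logic here
-- 	i = 0
-- 	while i < len(Array):
-- 		if Array[i] == Number:
-- 			Array.remove(Number)
-- 		else:
-- 			i += 1
-- 	return len(Array)
-- ===== SOURCE B (Python) =====
-- from typing import List
--
-- def removeOccurences(Array: List[int], Number: int) -> int:
-- 	# single-pass two-pointer compaction; mutates Array in place like A
-- 	w = 0
-- 	for r in range(len(Array)):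
-- 		if Array[r] != Number:
-- 			Array[w] = Array[r]
-- 			w += 1
-- 	del Array[w:]
-- 	return w
-- ===== Notes on version B (the rewrite author's own statement) =====
-- stated objective: faster
-- what changed: Replaces A's while-loop with repeated Array.remove(Number) rescans (each remove is a linear scan plus shift) by a single forward two-pointer compaction pass that overwrites kept elements at a write index and truncates the tail, returning the write index.
import Mathlib
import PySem

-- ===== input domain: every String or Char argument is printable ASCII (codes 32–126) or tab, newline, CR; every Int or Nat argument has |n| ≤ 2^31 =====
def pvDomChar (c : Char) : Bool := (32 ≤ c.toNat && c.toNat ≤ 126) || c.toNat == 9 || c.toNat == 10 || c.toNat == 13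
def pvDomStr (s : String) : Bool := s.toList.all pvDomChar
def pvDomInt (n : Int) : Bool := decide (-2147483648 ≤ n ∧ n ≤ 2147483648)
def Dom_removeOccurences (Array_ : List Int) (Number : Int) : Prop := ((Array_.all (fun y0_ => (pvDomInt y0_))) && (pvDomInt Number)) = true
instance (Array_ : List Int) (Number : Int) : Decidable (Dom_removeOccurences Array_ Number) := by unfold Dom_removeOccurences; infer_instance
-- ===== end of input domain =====

-- B replaces A's repeated in-place `.remove()` rescans by a single forward two-pointer
-- compaction pass; both Pythons mutate the argument list in place the same way, and the
-- equivalence proved here is about the RETURN value (the count of elements ≠ Number).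

-- ===== PORT A =====
-- the while loop: i advances, or Array.remove(Number) shortens the list.
-- `(remove? xs n).getD xs`: the branch runs only when Array[i] == Number, so Number ∈ xs
-- and remove? is `some` (Python's remove cannot raise here).
def removeLoopA (xs : List Int) (n : Int) (i : Nat) : List Int :=
  if h : i < xs.length then
    if heq : PySem.List.pyGetD xs (i : Int) 0 = n then
      removeLoopA ((PySem.List.remove? xs n).getD xs) n i
    else
      removeLoopA xs n (i + 1)
  else xs
termination_by xs.length - i
decreasing_by
  · have hm : n ∈ xs := by
      have : xs.getD i 0 = n := by simpa [PySem.List.pyGetD_natCast] using heq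
      rw [← this, List.getD_eq_getElem _ _ h]
      exact List.getElem_mem h
    rw [PySem.List.remove?_eq_some_erase xs n hm]
    have := List.length_erase_of_mem hm
    simp only [Option.getD_some]
    omega
  · omega

def removeOccurences (Array_ : List Int) (Number : Int) : Int :=
  ((removeLoopA Array_ Number 0).length : Int)

-- ===== PORT B =====
-- Source B: w = 0; for r in range(len(Array)): if Array[r] != Number: Array[w] = Array[r]; w += 1
--       del Array[w:]; return w    (the `del` only truncates the in-place list; the return is w)
def removeOccurences_alt (Array_ : List Int) (Number : Int) : Int :=
  let st := (PySem.List.pyRange 0 (Array_.length : Int) 1).foldl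
    (fun (st : List Int × Int) r =>
      if PySem.List.pyGetD st.1 r 0 ≠ Number then
        (PySem.List.pySetD st.1 st.2 (PySem.List.pyGetD st.1 r 0), st.2 + 1)
      else st)
    (Array_, 0)
  st.2

-- ===== PRECONDITION & SPEC =====
def Spec_removeOccurences (Array_ : List Int) (Number : Int) (out : Int) : Prop := out = removeOccurences_alt Array_ Number
instance (Array_ : List Int) (Number : Int) (out : Int) : Decidable (Spec_removeOccurences Array_ Number out) := by unfold Spec_removeOccurences; infer_instance

-- ===== CLAIM (what is proved, stated in full; the proofs are below) =====
def Claim_equal_removeOccurences : Prop := ∀ (Array_ : List Int) (Number : Int), Dom_removeOccurences Array_ Number → Spec_removeOccurences Array_ Number (removeOccurences Array_ Number)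

-- ===== LEMMAS AND PROOFS =====

-- A's loop keeps the scanned prefix (all ≠ n) and filters the rest.
theorem loopA_eq (xs : List Int) (n : Int) (i : Nat)
    (hpre : ∀ x ∈ xs.take i, x ≠ n) :
    removeLoopA xs n i = xs.take i ++ (xs.drop i).filter (fun x => x != n) := by
  induction xs, i using removeLoopA.induct (n := n) with
  | case1 xs i h heq ih =>
    have hget : xs[i] = n := by
      have : xs.getD i 0 = n := by simpa [PySem.List.pyGetD_natCast] using heq
      rwa [List.getD_eq_getElem _ _ h] at this
    have hm : n ∈ xs := hget ▸ List.getElem_mem h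
    have herase : xs.erase n = xs.take i ++ xs.drop (i + 1) := by
      conv_lhs => rw [← List.take_append_drop i xs, ← List.getElem_cons_drop h]
      rw [List.erase_append_right _ (by intro hmem; exact hpre _ hmem rfl), hget,
        List.erase_cons_head]
    rw [PySem.List.remove?_eq_some_erase xs n hm, Option.getD_some] at ih
    rw [removeLoopA, dif_pos h, dif_pos heq, PySem.List.remove?_eq_some_erase xs n hm,
      Option.getD_some]
    have hlen : i ≤ (xs.take i).length := by simp [List.length_take]; omega
    have hpre' : ∀ x ∈ (xs.erase n).take i, x ≠ n := by
      intro x hx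
      rw [herase, List.take_append_of_le_length (by simpa using hlen)] at hx
      exact hpre x (by simpa [List.take_take] using hx)
    rw [ih hpre', herase]
    have htl : (xs.take i).length = i := by simp [List.length_take]; omega
    rw [List.take_append_of_le_length (le_of_eq htl.symm),
      List.drop_append_of_le_length (le_of_eq htl.symm)]
    simp [List.take_take]
    conv_rhs => rw [← List.getElem_cons_drop h]
    simp [hget]
  | case2 xs i h heq ih =>
    have hget : xs[i] ≠ n := by
      intro hc
      exact heq (by simp [PySem.List.pyGetD_natCast, List.getElem?_eq_getElem h, hc, List.getD])
    have hpre' : ∀ x ∈ xs.take (i + 1), x ≠ n := by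
      intro x hx
      rw [List.take_add_one] at hx
      rcases List.mem_append.mp hx with h1 | h2
      · exact hpre x h1
      · have : x = xs[i] := by simpa [List.getElem?_eq_getElem h] using h2
        simpa [this] using hget
    rw [removeLoopA, dif_pos h, dif_neg heq, ih hpre']
    have hdi : xs.drop i = xs[i] :: xs.drop (i + 1) := (List.getElem_cons_drop h).symm
    rw [List.take_add_one, List.getElem?_eq_getElem h]
    conv_rhs => rw [hdi]
    rw [List.filter_cons, if_pos (by simpa using hget)]
    simp only [Option.toList_some, List.append_assoc, List.singleton_append]
  | case3 xs i h =>
    rw [removeLoopA, dif_neg h]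
    have : xs.length ≤ i := by omega
    simp [List.take_of_length_le this, List.drop_of_length_le this]

-- B's fold: invariant over the remaining range.
theorem loopB_eq (n : Int) (L : Int) : ∀ (k : Nat) (arr : List Int) (w : Int) (r : Nat),
    L = (arr.length : Int) → r + k = arr.length → 0 ≤ w → (w : Int) ≤ (r : Int) →
    (((PySem.List.pyRange (r : Int) L 1).foldl
      (fun (st : List Int × Int) j =>
        if PySem.List.pyGetD st.1 j 0 ≠ n then
          (PySem.List.pySetD st.1 st.2 (PySem.List.pyGetD st.1 j 0), st.2 + 1)
        else st)
      (arr, w)).2 : Int) = w + ((arr.drop r).countP (fun x => x != n) : Int) := by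
  intro k
  induction k with
  | zero =>
    intro arr w r hL hr hw hwr
    have : r = arr.length := by omega
    rw [PySem.List.pyRange_one_eq_nil (by omega)]
    simp [this, List.drop_of_length_le]
  | succ k ih =>
    intro arr w r hL hr hw hwr
    have hrlt : r < arr.length := by omega
    rw [PySem.List.pyRange_one_cons (by omega)]
    simp only [List.foldl_cons]
    have hget : PySem.List.pyGetD arr (r : Int) 0 = arr[r] := by
      simp [PySem.List.pyGetD_natCast, List.getElem?_eq_getElem hrlt, List.getD]
    have hdropr : arr.drop r = arr[r] :: arr.drop (r + 1) := (List.getElem_cons_drop hrlt).symm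
    by_cases hne : arr[r] ≠ n
    · rw [if_pos (by simpa [hget] using hne)]
      have hset : PySem.List.pySetD arr w arr[r] = arr.set w.toNat arr[r] :=
        PySem.List.pySetD_of_nonneg _ _ hw
      have hlen : (arr.set w.toNat arr[r]).length = arr.length := by simp
      have hwt : w.toNat < r + 1 := by omega
      have hdrop : (arr.set w.toNat arr[r]).drop (r + 1) = arr.drop (r + 1) := by
        rw [List.drop_set, if_pos hwt]
      have hcast : ((r : Int) + 1) = ((r + 1 : Nat) : Int) := by push_cast; ring
      rw [hget, hset, hcast,
        ih (arr.set w.toNat arr[r]) (w + 1) (r + 1) (by rw [hlen]; exact hL)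
          (by omega) (by omega) (by push_cast; omega)]
      rw [hdrop, hdropr, List.countP_cons, if_pos (by simpa using hne)]
      push_cast; ring
    · rw [if_neg (by simpa [hget] using hne)]
      have hcast : ((r : Int) + 1) = ((r + 1 : Nat) : Int) := by push_cast; ring
      rw [hcast, ih arr w (r + 1) hL (by omega) hw (by push_cast; omega)]
      rw [hdropr, List.countP_cons, if_neg (by simpa using hne)]
      simp

theorem alt_eq_countP (Array_ : List Int) (Number : Int) :
    removeOccurences_alt Array_ Number = (Array_.countP (fun x => x != Number) : Int) := by
  unfold removeOccurences_alt
  have := loopB_eq Number (Array_.length : Int) Array_.length Array_ 0 0 rfl (by omega) le_rfl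
    (by simp)
  simpa using this

-- ===== VERDICT (by name: the statement is the Claim_ definition above) =====
theorem removeOccurences_spec : Claim_equal_removeOccurences := by
  intro Array_ Number _
  unfold Spec_removeOccurences removeOccurences
  rw [alt_eq_countP, loopA_eq Array_ Number 0 (by simp)]
  simp [List.countP_eq_length_filter]
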